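-- pv_equiv track=rewrite | github.com/TakaIshikawa/blueprint | src/blueprint/rollout_communication_plan.py | _audience_from_terms
-- ===== SOURCE A (Python) =====
-- def _audience_from_terms(terms: list[str]) -> list[str]:
--     values: list[str] = []
--     if any(term in {"api", "backend", "frontend", "data", "security", "engineer"} for term in terms):
--         values.append("engineering")
--     if any(term in {"product", "ui", "ux", "user", "workflow"} for term in terms):
--         values.append("product")
--     if any(term in {"customer", "support", "operator", "ops", "incident", "availability"} for term in terms):
--         values.append("support")
--     return values
-- ===== SOURCE B (Python) =====
-- _ENGINEERING = frozenset({"api", "backend", "frontend", "data", "security", "engineer"})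
-- _PRODUCT = frozenset({"product", "ui", "ux", "user", "workflow"})
-- _SUPPORT = frozenset({"customer", "support", "operator", "ops", "incident", "availability"})
--
--
-- def _category(term: str) -> str | None:
--     if term in _ENGINEERING:
--         return "engineering"
--     if term in _PRODUCT:
--         return "product"
--     if term in _SUPPORT:
--         return "support"
--     return None
--
--
-- def _audience_from_terms(terms: list[str]) -> list[str]:
--     seen: set[str] = set()
--     for term in terms:
--         category = _category(term)
--         if category is not None:
--             seen.add(category)
--     return [c for c in ("engineering", "product", "support") if c in seen]
-- ===== Notes on version B (the rewrite author's own statement) =====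
-- stated objective: alternative
-- what changed: Replaces three separate any-scans over terms (one per category) with a single pass that classifies each term once into a seen-set, then emits the categories in the fixed canonical order.
import Mathlib
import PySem

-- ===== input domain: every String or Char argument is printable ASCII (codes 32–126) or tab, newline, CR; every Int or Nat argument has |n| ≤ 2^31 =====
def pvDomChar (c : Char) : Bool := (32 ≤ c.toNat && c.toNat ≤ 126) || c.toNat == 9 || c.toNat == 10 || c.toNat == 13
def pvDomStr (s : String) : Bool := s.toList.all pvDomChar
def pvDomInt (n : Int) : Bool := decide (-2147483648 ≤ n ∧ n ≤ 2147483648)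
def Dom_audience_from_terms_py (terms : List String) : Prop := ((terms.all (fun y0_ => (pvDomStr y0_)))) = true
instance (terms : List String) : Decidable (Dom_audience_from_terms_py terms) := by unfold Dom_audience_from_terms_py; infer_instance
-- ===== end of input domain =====

-- B replaces A's three separate any-scans over `terms` with a single classifying
-- pass into a seen-set followed by an ordered emit (objective: alternative decomposition).

-- ===== PORT A =====
def audience_from_terms_py (terms : List String) : List String :=
  let values : List String := []
  let values := if terms.any (fun term =>
      (["api", "backend", "frontend", "data", "security", "engineer"] : List String).contains term)
    then values ++ ["engineering"] else values
  let values := if terms.any (fun term =>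
      (["product", "ui", "ux", "user", "workflow"] : List String).contains term)
    then values ++ ["product"] else values
  let values := if terms.any (fun term =>
      (["customer", "support", "operator", "ops", "incident", "availability"] : List String).contains term)
    then values ++ ["support"] else values
  values

-- ===== PORT B =====
-- frozenset membership is ported as membership in the list of the set's distinct elements (exact)
def pvEngSet : List String := ["api", "backend", "frontend", "data", "security", "engineer"]
def pvProdSet : List String := ["product", "ui", "ux", "user", "workflow"]
def pvSupSet : List String := ["customer", "support", "operator", "ops", "incident", "availability"]

def pvCategory (term : String) : Option String :=
  if pvEngSet.contains term then some "engineering"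
  else if pvProdSet.contains term then some "product"
  else if pvSupSet.contains term then some "support"
  else none

def audience_from_terms_py_alt (terms : List String) : List String :=
  let seen : PySem.Set String := terms.foldl (fun s term =>
    match pvCategory term with
    | some c => PySem.Set.add s c
    | none => s) PySem.Set.empty
  (["engineering", "product", "support"] : List String).filter (fun c => PySem.Set.contains seen c)

-- ===== PRECONDITION & SPEC =====
def Spec_audience_from_terms_py (terms : List String) (out : List String) : Prop := out = audience_from_terms_py_alt terms
instance (terms : List String) (out : List String) : Decidable (Spec_audience_from_terms_py terms out) := by unfold Spec_audience_from_terms_py; infer_instance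

-- ===== CLAIM (what is proved, stated in full; the proofs are below) =====
def Claim_equal_audience_from_terms_py : Prop := ∀ (terms : List String), Dom_audience_from_terms_py terms → Spec_audience_from_terms_py terms (audience_from_terms_py terms)

-- ===== LEMMAS AND PROOFS =====

theorem mem_add_iff (s : PySem.Set String) (x c : String) :
    c ∈ PySem.Set.add s x ↔ c ∈ s ∨ c = x := by
  unfold PySem.Set.add
  split_ifs with h <;> simp_all

theorem mem_fold_seen (terms : List String) (s : PySem.Set String) (c : String) :
    c ∈ (terms.foldl (fun s term =>
      match pvCategory term with
      | some cc => PySem.Set.add s cc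
      | none => s) s) ↔ c ∈ s ∨ ∃ t ∈ terms, pvCategory t = some c := by
  induction terms generalizing s with
  | nil => simp
  | cons t ts ih =>
    simp only [List.foldl_cons, ih, List.mem_cons]
    cases h : pvCategory t with
    | none => simp [h]
    | some c' =>
      rw [mem_add_iff]
      constructor
      · rintro ((hs | rfl) | hrest)
        · exact Or.inl hs
        · exact Or.inr ⟨t, Or.inl rfl, h⟩
        · obtain ⟨u, hu, hc⟩ := hrest; exact Or.inr ⟨u, Or.inr hu, hc⟩
      · rintro (hs | ⟨u, (rfl | hu), hc⟩)
        · exact Or.inl (Or.inl hs)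
        · rw [h] at hc; exact Or.inl (Or.inr (Option.some.inj hc).symm)
        · exact Or.inr ⟨u, hu, hc⟩

theorem cat_eng (t : String) : pvCategory t = some "engineering" ↔ t ∈ pvEngSet := by
  unfold pvCategory
  split_ifs with h1 h2 h3 <;> simp_all

theorem eng_not_prod (t : String) (h : t ∈ pvEngSet) : t ∉ pvProdSet := by
  simp only [pvEngSet, List.mem_cons, List.not_mem_nil, or_false] at h
  rcases h with rfl | rfl | rfl | rfl | rfl | rfl <;> decide

theorem eng_not_sup (t : String) (h : t ∈ pvEngSet) : t ∉ pvSupSet := by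
  simp only [pvEngSet, List.mem_cons, List.not_mem_nil, or_false] at h
  rcases h with rfl | rfl | rfl | rfl | rfl | rfl <;> decide

theorem prod_not_sup (t : String) (h : t ∈ pvProdSet) : t ∉ pvSupSet := by
  simp only [pvProdSet, List.mem_cons, List.not_mem_nil, or_false] at h
  rcases h with rfl | rfl | rfl | rfl | rfl <;> decide

theorem cat_prod (t : String) : pvCategory t = some "product" ↔ t ∈ pvProdSet := by
  unfold pvCategory
  split_ifs with h1 h2 h3 <;> simp_all
  exact eng_not_prod t h1

theorem cat_sup (t : String) : pvCategory t = some "support" ↔ t ∈ pvSupSet := by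
  unfold pvCategory
  split_ifs with h1 h2 h3 <;> simp_all
  · exact eng_not_sup t h1
  · exact prod_not_sup t h2

-- ===== VERDICT (by name: the statement is the Claim_ definition above) =====
theorem audience_from_terms_py_spec : Claim_equal_audience_from_terms_py := by
  intro terms _
  unfold Spec_audience_from_terms_py audience_from_terms_py audience_from_terms_py_alt
  have key : ∀ (c : String) (l : List String), (∀ t, pvCategory t = some c ↔ t ∈ l) →
      PySem.Set.contains (terms.foldl (fun s term =>
        match pvCategory term with
        | some cc => PySem.Set.add s cc
        | none => s) PySem.Set.empty) c = terms.any (fun term => l.contains term) := by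
    intro c l hl
    rw [Bool.eq_iff_iff]
    simp [PySem.Set.contains, PySem.Set.empty, mem_fold_seen, List.any_eq_true, hl]
  have hE := key "engineering" pvEngSet cat_eng
  have hP := key "product" pvProdSet cat_prod
  have hS := key "support" pvSupSet cat_sup
  simp only [pvEngSet, pvProdSet, pvSupSet] at hE hP hS
  simp only [List.filter_cons, List.filter_nil, hE, hP, hS]
  cases terms.any (fun term => (["api", "backend", "frontend", "data", "security", "engineer"] : List String).contains term) <;>
  cases terms.any (fun term => (["product", "ui", "ux", "user", "workflow"] : List String).contains term) <;>
  cases terms.any (fun term => (["customer", "support", "operator", "ops", "incident", "availability"] : List String).contains term) <;>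
    simp
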